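-- pv_equiv track=rewrite | github.com/mrg0809/padelplay | backend/app/utils/tournament_utils.py | _get_round_names
-- ===== SOURCE A (Python) =====
-- def _get_round_names(num_rounds):
--     """Genera nombres de rondas para eliminación directa."""
--     if num_rounds == 1:
--         return ["Final"]
--     elif num_rounds == 2:
--         return ["Semifinal", "Final"]
--     elif num_rounds == 3:
--         return ["Cuartos de Final", "Semifinal", "Final"]
--     elif num_rounds == 4:
--         return ["Octavos de Final", "Cuartos de Final", "Semifinal", "Final"]
--     elif num_rounds == 5:
--         return ["Dieciseisavos de Final", "Octavos de Final", "Cuartos de Final", "Semifinal", "Final"]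
--     else:
--         # Para más rondas, usar nomenclatura genérica
--         names = []
--         for i in range(num_rounds - 3):
--             names.append(f"Ronda {i + 1}")
--         names.extend(["Cuartos de Final", "Semifinal", "Final"])
--         return names
-- ===== SOURCE B (Python) =====
-- def _get_round_names(num_rounds):
--     """Genera nombres de rondas para eliminación directa."""
--     if num_rounds == 1:
--         return ["Final"]
--     if num_rounds in (2, 3, 4, 5):
--         head = {2: "Semifinal", 3: "Cuartos de Final",
--                 4: "Octavos de Final", 5: "Dieciseisavos de Final"}[num_rounds]
--         return [head] + _get_round_names(num_rounds - 1)
--     rondas = []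
--     for i in range(num_rounds - 3, 0, -1):
--         rondas.append("Ronda %d" % i)
--     rondas.reverse()
--     return rondas + ["Cuartos de Final", "Semifinal", "Final"]
-- ===== Notes on version B (the rewrite author's own statement) =====
-- stated objective: alternative
-- what changed: Replaces A's five hard-coded result lists by recursive peeling (each known bracket size conses its opening-round name, looked up by size, onto the result for one fewer round) and builds the generic names back-to-front by prepending over a countdown range instead of A's forward append loop.
import Mathlib
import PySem

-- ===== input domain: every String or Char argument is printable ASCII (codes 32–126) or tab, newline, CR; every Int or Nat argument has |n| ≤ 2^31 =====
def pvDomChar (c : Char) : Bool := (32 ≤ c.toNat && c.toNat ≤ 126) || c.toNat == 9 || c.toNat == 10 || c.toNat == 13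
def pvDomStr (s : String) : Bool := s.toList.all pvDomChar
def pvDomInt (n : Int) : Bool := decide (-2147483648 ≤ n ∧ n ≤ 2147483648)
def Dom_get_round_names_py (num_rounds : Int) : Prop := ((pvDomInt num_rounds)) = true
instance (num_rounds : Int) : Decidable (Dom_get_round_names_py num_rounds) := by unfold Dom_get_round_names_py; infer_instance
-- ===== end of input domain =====

-- B replaces A's five hard-coded result lists and append loop by recursive peeling (objective: alternative).
-- ===== PORT A =====
def get_round_names_py (num_rounds : Int) : List String :=
  if num_rounds = 1 then ["Final"]
  else if num_rounds = 2 then ["Semifinal", "Final"]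
  else if num_rounds = 3 then ["Cuartos de Final", "Semifinal", "Final"]
  else if num_rounds = 4 then ["Octavos de Final", "Cuartos de Final", "Semifinal", "Final"]
  else if num_rounds = 5 then ["Dieciseisavos de Final", "Octavos de Final", "Cuartos de Final", "Semifinal", "Final"]
  else
    let names : List String :=
      (PySem.List.pyRange 0 (num_rounds - 3) 1).foldl
        (fun acc i => acc ++ ["Ronda " ++ PySem.Int.toStr (i + 1)]) []
    names ++ ["Cuartos de Final", "Semifinal", "Final"]

-- ===== PORT B =====
def get_round_names_py_alt (num_rounds : Int) : List String :=
  if _h1 : num_rounds = 1 then ["Final"]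
  else if h2 : num_rounds = 2 ∨ num_rounds = 3 ∨ num_rounds = 4 ∨ num_rounds = 5 then
    -- dict lookup {2:…,…}[num_rounds]; the key is always present on this branch, so getD's default is never used
    (PySem.Dict.getD (PySem.Dict.mk [((2:Int), "Semifinal"), (3, "Cuartos de Final"),
        (4, "Octavos de Final"), (5, "Dieciseisavos de Final")]) num_rounds "")
      :: get_round_names_py_alt (num_rounds - 1)
  else
    -- generic names generated last-to-first over a countdown range, then reversed
    ((PySem.List.pyRange (num_rounds - 3) 0 (-1)).foldl
        (fun rondas i => rondas ++ ["Ronda " ++ PySem.Int.toStr i]) []).reverse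
      ++ ["Cuartos de Final", "Semifinal", "Final"]
termination_by num_rounds.toNat
decreasing_by omega

-- ===== PRECONDITION & SPEC =====
def Spec_get_round_names_py (num_rounds : Int) (out : List String) : Prop := out = get_round_names_py_alt num_rounds
instance (num_rounds : Int) (out : List String) : Decidable (Spec_get_round_names_py num_rounds out) := by unfold Spec_get_round_names_py; infer_instance

-- ===== CLAIM (what is proved, stated in full; the proofs are below) =====
def Claim_equal_get_round_names_py : Prop := ∀ (num_rounds : Int), Dom_get_round_names_py num_rounds → Spec_get_round_names_py num_rounds (get_round_names_py num_rounds)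

-- ===== LEMMAS AND PROOFS =====
-- the reversed countdown append loop produces the "Ronda j" names for j in [1, n-2)
theorem pvPrepend_eq_map (n : Int) :
    ((PySem.List.pyRange (n - 3) 0 (-1)).foldl
        (fun rondas i => rondas ++ ["Ronda " ++ PySem.Int.toStr i]) []).reverse
      = (PySem.List.pyRange 1 (n - 2) 1).map (fun j => "Ronda " ++ PySem.Int.toStr j) := by
  have h : (0:Int) + 1 = 1 := by ring
  have h2 : n - 3 + 1 = n - 2 := by ring
  rw [PySem.List.foldl_append_singleton_eq_map, PySem.List.pyRange_neg_one_eq_reverse, h, h2]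
  simp [List.map_reverse]

-- shift the index: A maps (i+1) over range 0..(n-3); B maps j over range 1..(n-2)
theorem pvShift (n : Int) :
    (PySem.List.pyRange 0 (n - 3) 1).map (fun i => "Ronda " ++ PySem.Int.toStr (i + 1))
      = (PySem.List.pyRange 1 (n - 2) 1).map (fun j => "Ronda " ++ PySem.Int.toStr j) := by
  rw [PySem.List.pyRange_one 0 (n - 3), PySem.List.pyRange_one 1 (n - 2)]
  have he : (n - 3 - 0).toNat = (n - 2 - 1).toNat := by omega
  rw [he, List.map_map, List.map_map]
  apply List.map_congr_left
  intro k _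
  simp only [Function.comp_apply]
  have : ((0:Int) + k + 1) = 1 + k := by ring
  rw [this]

-- ===== VERDICT (by name: the statement is the Claim_ definition above) =====
theorem get_round_names_py_spec : Claim_equal_get_round_names_py := by
  intro n _
  unfold Spec_get_round_names_py
  by_cases h : n = 1 ∨ n = 2 ∨ n = 3 ∨ n = 4 ∨ n = 5
  · rcases h with h | h | h | h | h <;> subst h <;>
      simp [get_round_names_py, get_round_names_py_alt, PySem.Dict.getD, PySem.Dict.get?]
  · have h1 : n ≠ 1 := by tauto
    have h2 : ¬ (n = 2 ∨ n = 3 ∨ n = 4 ∨ n = 5) := by tauto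
    rw [get_round_names_py_alt, dif_neg h1, dif_neg h2, pvPrepend_eq_map]
    unfold get_round_names_py
    rw [if_neg h1, if_neg (by tauto : n ≠ 2), if_neg (by tauto : n ≠ 3),
      if_neg (by tauto : n ≠ 4), if_neg (by tauto : n ≠ 5)]
    simp only [PySem.List.foldl_append_singleton_eq_map, List.nil_append]
    rw [pvShift]
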